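-- pv_equiv track=rewrite | github.com/intentionally-left-blank/Amaryllis | scripts/release/check_import_boundaries.py | _package_to_layer
-- ===== SOURCE A (Python) =====
-- LAYER_PACKAGES: dict[str, tuple[str, ...]] = {
--     "api": ("api",),
--     "orchestration": ("agents", "automation", "controller", "planner", "tasks"),
--     "kernel": ("kernel",),
--     "storage": ("storage",),
--     "ui": ("macos",),
-- }
--
-- def _package_to_layer(package: str) -> str | None:
--     normalized = str(package or "").strip()
--     if not normalized:
--         return None
--     for layer, packages in LAYER_PACKAGES.items():
--         if normalized in packages:
--             return layer
--     return None
-- ===== SOURCE B (Python) =====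
-- # Binary search over a sorted flat (package, layer) table instead of scanning
-- # layer tuples; correct because the keys are distinct and lexicographically sorted.
-- _SORTED_PAIRS = [
--     ("agents", "orchestration"),
--     ("api", "api"),
--     ("automation", "orchestration"),
--     ("controller", "orchestration"),
--     ("kernel", "kernel"),
--     ("macos", "ui"),
--     ("planner", "orchestration"),
--     ("storage", "storage"),
--     ("tasks", "orchestration"),
-- ]
--
-- def _package_to_layer(package: str) -> str | None:
--     normalized = str(package or "").strip()
--     if not normalized:
--         return None
--     lo, hi = 0, len(_SORTED_PAIRS)
--     while lo < hi:
--         mid = (lo + hi) // 2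
--         key, layer = _SORTED_PAIRS[mid]
--         if key == normalized:
--             return layer
--         if key < normalized:
--             lo = mid + 1
--         else:
--             hi = mid
--     return None
-- ===== Notes on version B (the rewrite author's own statement) =====
-- stated objective: alternative
-- what changed: Replaces A's linear scan over LAYER_PACKAGES items with tuple-membership tests by a hand-written binary search over a lexicographically sorted flat (package, layer) table; the per-layer loop and membership branch disappear in favour of lo/hi halving.
import Mathlib
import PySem

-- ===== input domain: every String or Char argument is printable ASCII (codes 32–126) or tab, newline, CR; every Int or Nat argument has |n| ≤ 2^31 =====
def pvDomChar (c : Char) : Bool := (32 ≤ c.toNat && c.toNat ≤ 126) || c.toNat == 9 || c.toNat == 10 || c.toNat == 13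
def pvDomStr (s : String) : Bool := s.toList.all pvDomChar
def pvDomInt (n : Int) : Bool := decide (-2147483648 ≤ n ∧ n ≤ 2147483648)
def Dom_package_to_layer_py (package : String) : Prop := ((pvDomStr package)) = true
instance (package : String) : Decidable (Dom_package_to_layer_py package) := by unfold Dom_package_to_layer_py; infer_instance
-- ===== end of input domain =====

-- B replaces A's linear scan over layer tuples by a hand-written binary search
-- over a sorted flat (package, layer) table; objective: alternative algorithm.

-- ===== PORT A =====
-- LAYER_PACKAGES as an insertion-ordered list of (layer, packages) items
def pvLayerItems : List (String × List String) :=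
  [("api", ["api"]),
   ("orchestration", ["agents", "automation", "controller", "planner", "tasks"]),
   ("kernel", ["kernel"]),
   ("storage", ["storage"]),
   ("ui", ["macos"])]

-- the 'for layer, packages in LAYER_PACKAGES.items(): if normalized in packages: return layer' loop
def pvScanLayers (normalized : String) : List (String × List String) → Option String
  | [] => none
  | (layer, pkgs) :: rest =>
      if normalized ∈ pkgs then some layer else pvScanLayers normalized rest

def package_to_layer_py (package : String) : Option String :=
  let normalized := PySem.Str.strip package   -- str(package or "").strip(): identity on str input
  if normalized = "" then none
  else pvScanLayers normalized pvLayerItems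

-- ===== PORT B =====
-- _SORTED_PAIRS: the lexicographically sorted flat (package, layer) table
def pvSortedPairs : List (String × String) :=
  [("agents", "orchestration"),
   ("api", "api"),
   ("automation", "orchestration"),
   ("controller", "orchestration"),
   ("kernel", "kernel"),
   ("macos", "ui"),
   ("planner", "orchestration"),
   ("storage", "storage"),
   ("tasks", "orchestration")]

-- the 'while lo < hi' binary-search loop of B
def pvBsearch (normalized : String) (lo hi : Nat) : Option String :=
  if _h : lo < hi then
    let pair := pvSortedPairs.getD ((lo + hi) / 2) ("", "")
    if pair.1 = normalized then some pair.2
    else if pair.1 < normalized then pvBsearch normalized ((lo + hi) / 2 + 1) hi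
    else pvBsearch normalized lo ((lo + hi) / 2)
  else none
termination_by hi - lo
decreasing_by all_goals omega

def package_to_layer_py_alt (package : String) : Option String :=
  let normalized := PySem.Str.strip package
  if normalized = "" then none
  else pvBsearch normalized 0 pvSortedPairs.length

-- ===== PRECONDITION & SPEC =====
def Spec_package_to_layer_py (package : String) (out : Option String) : Prop := out = package_to_layer_py_alt package
instance (package : String) (out : Option String) : Decidable (Spec_package_to_layer_py package out) := by unfold Spec_package_to_layer_py; infer_instance

-- ===== CLAIM (what is proved, stated in full; the proofs are below) =====
def Claim_equal_package_to_layer_py : Prop := ∀ (package : String), Dom_package_to_layer_py package → Spec_package_to_layer_py package (package_to_layer_py package)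

-- ===== LEMMAS AND PROOFS =====

-- every key the binary search can fetch (including the out-of-range default "")
def pvKeys : List String :=
  ["agents", "api", "automation", "controller", "kernel", "macos", "planner", "storage", "tasks", ""]

theorem fetched_key_mem (mid : Nat) : (pvSortedPairs.getD mid ("", "")).1 ∈ pvKeys := by
  by_cases h : mid < 9
  · interval_cases mid <;> decide
  · have hlen : pvSortedPairs.length ≤ mid := by simp [pvSortedPairs]; omega
    rw [List.getD_eq_default _ _ hlen]
    decide

-- if n matches no key, the binary search returns none (it only returns on equality)
theorem bsearch_none (n : String) (hn : n ∉ pvKeys) :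
    ∀ (lo hi : Nat), pvBsearch n lo hi = none := by
  intro lo hi
  generalize hk : hi - lo = k
  induction k using Nat.strong_induction_on generalizing lo hi with
  | _ k ih =>
    rw [pvBsearch]
    split
    · have hne : (pvSortedPairs.getD ((lo + hi) / 2) ("", "")).1 ≠ n :=
        fun e => hn (e ▸ fetched_key_mem ((lo + hi) / 2))
      rw [if_neg hne]
      split
      · exact ih (hi - ((lo + hi) / 2 + 1)) (by omega) _ _ rfl
      · exact ih (((lo + hi) / 2) - lo) (by omega) _ _ rfl
    · rfl

-- if n matches no key, the layer scan returns none too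
theorem scan_none (n : String) (hn : n ∉ pvKeys) : pvScanLayers n pvLayerItems = none := by
  simp only [pvKeys, List.mem_cons, List.not_mem_nil, or_false, not_or] at hn
  obtain ⟨h1, h2, h3, h4, h5, h6, h7, h8, h9, _⟩ := hn
  simp [pvLayerItems, pvScanLayers, h1, h2, h3, h4, h5, h6, h7, h8, h9]

-- core: on any normalized string the two post-strip computations agree
theorem core (n : String) :
    (if n = "" then none else pvScanLayers n pvLayerItems) =
    (if n = "" then none else pvBsearch n 0 pvSortedPairs.length) := by
  by_cases h0 : n = ""
  · simp [h0]
  by_cases h1 : n = "agents";      · subst h1; simp [pvScanLayers, pvLayerItems, pvBsearch, pvSortedPairs]; decide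
  by_cases h2 : n = "api";         · subst h2; simp [pvScanLayers, pvLayerItems, pvBsearch, pvSortedPairs]; decide
  by_cases h3 : n = "automation";  · subst h3; simp [pvScanLayers, pvLayerItems, pvBsearch, pvSortedPairs]; decide
  by_cases h4 : n = "controller";  · subst h4; simp [pvScanLayers, pvLayerItems, pvBsearch, pvSortedPairs]; decide
  by_cases h5 : n = "kernel";      · subst h5; simp [pvScanLayers, pvLayerItems, pvBsearch, pvSortedPairs]
  by_cases h6 : n = "macos";       · subst h6; simp [pvScanLayers, pvLayerItems, pvBsearch, pvSortedPairs]; decide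
  by_cases h7 : n = "planner";     · subst h7; simp [pvScanLayers, pvLayerItems, pvBsearch, pvSortedPairs]; decide
  by_cases h8 : n = "storage";     · subst h8; simp [pvScanLayers, pvLayerItems, pvBsearch, pvSortedPairs]; decide
  by_cases h9 : n = "tasks";       · subst h9; simp [pvScanLayers, pvLayerItems, pvBsearch, pvSortedPairs]; decide
  have hn : n ∉ pvKeys := by
    simp [pvKeys, h0, h1, h2, h3, h4, h5, h6, h7, h8, h9]
  rw [if_neg h0, if_neg h0, scan_none n hn, bsearch_none n hn]

-- ===== VERDICT (by name: the statement is the Claim_ definition above) =====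
theorem package_to_layer_py_spec : Claim_equal_package_to_layer_py := by
  intro package _
  unfold Spec_package_to_layer_py package_to_layer_py package_to_layer_py_alt
  exact core (PySem.Str.strip package)
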